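-- pv_equiv track=rewrite | github.com/petersenjoern/CLINLP | src/ner/ner.py | remove_bilu_ids_from_true_and_pred_values
-- ===== SOURCE A (Python) =====
-- from typing import Dict, Iterator, List, Tuple, Union
--
-- def remove_bilu_ids_from_true_and_pred_values(non_bilu_label_to_bilu_ids: Dict[int, Tuple[List[int], int]],
--     true_values: List[int], pred_values: List[int]) -> Tuple[List[int], List[int]]:
--     """Reduce the BILI ids (true and predicted) to regular labels and ids"""
--
--     for idx, label in enumerate(true_values):
--         for _, (labels_list, non_bilu_label) in non_bilu_label_to_bilu_ids.items():
--             if label in labels_list: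
--                 true_values[idx] = non_bilu_label
--
--     for idx, label in enumerate(pred_values):
--         for _, (labels_list, non_bilu_label) in non_bilu_label_to_bilu_ids.items():
--             if label in labels_list:
--                 pred_values[idx] = non_bilu_label
--
--     return true_values, pred_values
-- ===== SOURCE B (Python) =====
-- def remove_bilu_ids_from_true_and_pred_values(non_bilu_label_to_bilu_ids, true_values, pred_values):
--     """Reduce the BILU ids (true and predicted) to regular labels and ids."""
--     # Flatten once: bilu id -> non-BILU label; later entries overwrite earlier,
--     # matching A's last-match-wins behaviour.
--     flat = {}
--     for _, (labels_list, non_bilu_label) in non_bilu_label_to_bilu_ids.items():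
--         for bilu_id in labels_list:
--             flat[bilu_id] = non_bilu_label
--     true_values[:] = [flat.get(x, x) for x in true_values]
--     pred_values[:] = [flat.get(x, x) for x in pred_values]
--     return true_values, pred_values
-- ===== Notes on version B (the rewrite author's own statement) =====
-- stated objective: faster
-- what changed: B flattens the mapping once into a dict id->label (later entries overwrite, preserving A's last-match-wins) and then does a single-pass lookup over each list, instead of A's per-element scan of every dict entry and its labels list.
import Mathlib
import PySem

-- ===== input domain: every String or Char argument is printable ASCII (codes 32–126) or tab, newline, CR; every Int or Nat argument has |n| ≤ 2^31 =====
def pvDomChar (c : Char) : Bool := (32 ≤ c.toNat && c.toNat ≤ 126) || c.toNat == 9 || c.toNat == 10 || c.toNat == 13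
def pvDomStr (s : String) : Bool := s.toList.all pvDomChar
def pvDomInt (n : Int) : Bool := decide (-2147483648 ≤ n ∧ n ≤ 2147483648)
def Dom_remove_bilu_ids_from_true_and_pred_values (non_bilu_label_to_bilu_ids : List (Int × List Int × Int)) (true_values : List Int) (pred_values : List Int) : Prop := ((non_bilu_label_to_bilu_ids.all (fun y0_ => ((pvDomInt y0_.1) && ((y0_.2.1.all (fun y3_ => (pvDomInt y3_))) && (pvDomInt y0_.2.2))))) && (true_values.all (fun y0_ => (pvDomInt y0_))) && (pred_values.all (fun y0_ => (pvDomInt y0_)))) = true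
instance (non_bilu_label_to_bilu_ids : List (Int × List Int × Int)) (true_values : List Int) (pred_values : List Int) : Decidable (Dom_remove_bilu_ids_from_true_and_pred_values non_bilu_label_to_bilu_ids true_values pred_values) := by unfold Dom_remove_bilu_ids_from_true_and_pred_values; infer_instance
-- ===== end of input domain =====

-- B flattens the dict once into an id→label map (later entries overwrite, keeping A's
-- last-match-wins) and then does a single-pass lookup, instead of A's per-element scan of
-- every dict entry. A (and B) also mutate the two lists in place; the equivalence proved
-- here is about the RETURN value (B performs the same in-place mutation in Python).

-- ===== PORT A =====
-- inner loop of A: for each dict entry, if label ∈ labels_list, overwrite the cell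
def pvInnerA (non_bilu_label_to_bilu_ids : List (Int × List Int × Int)) (label : Int) : Int :=
  non_bilu_label_to_bilu_ids.foldl
    (fun cur e => if label ∈ e.2.1 then e.2.2 else cur) label

-- outer loop of A over a list: each cell is read (the original label) and possibly overwritten
def pvPassA (non_bilu_label_to_bilu_ids : List (Int × List Int × Int)) : List Int → List Int
  | [] => []
  | label :: rest => pvInnerA non_bilu_label_to_bilu_ids label :: pvPassA non_bilu_label_to_bilu_ids rest

def remove_bilu_ids_from_true_and_pred_values (non_bilu_label_to_bilu_ids : List (Int × List Int × Int)) (true_values : List Int) (pred_values : List Int) : List Int × List Int :=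
  (pvPassA non_bilu_label_to_bilu_ids true_values, pvPassA non_bilu_label_to_bilu_ids pred_values)

-- ===== PORT B =====
-- flat = {} ; for each entry, for each bilu_id: flat[bilu_id] = non_bilu_label
def pvFlatB (non_bilu_label_to_bilu_ids : List (Int × List Int × Int)) : PySem.Dict Int Int :=
  non_bilu_label_to_bilu_ids.foldl
    (fun m e => e.2.1.foldl (fun m i => m.insert i e.2.2) m) PySem.Dict.empty

def remove_bilu_ids_from_true_and_pred_values_alt (non_bilu_label_to_bilu_ids : List (Int × List Int × Int)) (true_values : List Int) (pred_values : List Int) : List Int × List Int :=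
  let flat := pvFlatB non_bilu_label_to_bilu_ids
  (true_values.map (fun x => flat.getD x x), pred_values.map (fun x => flat.getD x x))

-- ===== PRECONDITION & SPEC =====
def Spec_remove_bilu_ids_from_true_and_pred_values (non_bilu_label_to_bilu_ids : List (Int × List Int × Int)) (true_values : List Int) (pred_values : List Int) (out : List Int × List Int) : Prop := out = remove_bilu_ids_from_true_and_pred_values_alt non_bilu_label_to_bilu_ids true_values pred_values
instance (non_bilu_label_to_bilu_ids : List (Int × List Int × Int)) (true_values : List Int) (pred_values : List Int) (out : List Int × List Int) : Decidable (Spec_remove_bilu_ids_from_true_and_pred_values non_bilu_label_to_bilu_ids true_values pred_values out) := by unfold Spec_remove_bilu_ids_from_true_and_pred_values; infer_instance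

-- ===== CLAIM (what is proved, stated in full; the proofs are below) =====
def Claim_equal_remove_bilu_ids_from_true_and_pred_values : Prop := ∀ (non_bilu_label_to_bilu_ids : List (Int × List Int × Int)) (true_values : List Int) (pred_values : List Int), Dom_remove_bilu_ids_from_true_and_pred_values non_bilu_label_to_bilu_ids true_values pred_values → Spec_remove_bilu_ids_from_true_and_pred_values non_bilu_label_to_bilu_ids true_values pred_values (remove_bilu_ids_from_true_and_pred_values non_bilu_label_to_bilu_ids true_values pred_values)

-- ===== LEMMAS AND PROOFS =====

-- inserting the same value v at every key of `labels` acts like a conditional overwrite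
theorem pvFlat_labels_getD (labels : List Int) (v : Int) (m : PySem.Dict Int Int) (x d0 : Int) :
    (labels.foldl (fun m i => m.insert i v) m).getD x d0
      = if x ∈ labels then v else m.getD x d0 := by
  induction labels generalizing m with
  | nil => simp
  | cons i rest ih =>
    simp only [List.foldl_cons, ih, List.mem_cons, PySem.Dict.getD_insert]
    by_cases hx : x ∈ rest
    · simp [hx]
    · by_cases hxi : x = i <;> simp [hx, hxi]

-- A's inner scan from any accumulator equals a lookup in the flattened dict
theorem pvInner_eq_getD (d : List (Int × List Int × Int)) (m : PySem.Dict Int Int) (label : Int) :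
    d.foldl (fun cur e => if label ∈ e.2.1 then e.2.2 else cur) (m.getD label label)
      = (d.foldl (fun m e => e.2.1.foldl (fun m i => m.insert i e.2.2) m) m).getD label label := by
  induction d generalizing m with
  | nil => rfl
  | cons e rest ih =>
    simp only [List.foldl_cons]
    rw [← pvFlat_labels_getD e.2.1 e.2.2 m label label, ih]

theorem pvInnerA_eq (d : List (Int × List Int × Int)) (label : Int) :
    pvInnerA d label = (pvFlatB d).getD label label := by
  have h := pvInner_eq_getD d PySem.Dict.empty label
  simpa [pvInnerA, pvFlatB, PySem.Dict.getD_empty] using h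

theorem pvPassA_eq_map (d : List (Int × List Int × Int)) (vals : List Int) :
    pvPassA d vals = vals.map (fun x => (pvFlatB d).getD x x) := by
  induction vals with
  | nil => rfl
  | cons x rest ih => simp [pvPassA, ih, pvInnerA_eq]

-- ===== VERDICT (by name: the statement is the Claim_ definition above) =====
theorem remove_bilu_ids_from_true_and_pred_values_spec : Claim_equal_remove_bilu_ids_from_true_and_pred_values := by
  intro d t p _
  unfold Spec_remove_bilu_ids_from_true_and_pred_values
  unfold remove_bilu_ids_from_true_and_pred_values remove_bilu_ids_from_true_and_pred_values_alt
  simp [pvPassA_eq_map]
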